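-- pv_equiv track=rewrite | github.com/zasab/SLURMminer_Engine | functions/graphObject.py | update_job_ids
-- ===== SOURCE A (Python) =====
-- def update_job_ids(old_job_ids, new_input_job_ids):
--     for new_job_id in new_input_job_ids:
--         found = False
--         for sublist in old_job_ids:
--             if new_job_id in sublist:
--                 found = True
--                 break
--         if not found:
--             for sublist in old_job_ids:
--                 if not any(job_id in sublist for job_id in new_input_job_ids if job_id != new_job_id):
--                     sublist.append(new_job_id)
--                     break
--     old_job_ids.sort(key=len,reverse=True)
--     return old_job_ids
-- ===== SOURCE B (Python) =====
-- def update_job_ids(old_job_ids, new_input_job_ids):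
--     # Index-then-single-pass: one scan builds the set of present ids and the
--     # list of indices of sublists disjoint from the new ids; a pointer then
--     # assigns each unseen new id to the next such sublist.
--     new_set = set(new_input_job_ids)
--     present = set()
--     for sub in old_job_ids:
--         present.update(sub)
--     clean = [j for j, sub in enumerate(old_job_ids)
--              if not any(x in new_set for x in sub)]
--     i = 0
--     for nid in new_input_job_ids:
--         if nid not in present and i < len(clean):
--             old_job_ids[clean[i]].append(nid)
--             i += 1
--             present.add(nid)
--     old_job_ids.sort(key=len, reverse=True)
--     return old_job_ids
-- ===== Notes on version B (the rewrite author's own statement) =====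
-- stated objective: faster
-- what changed: Replaces A's per-new-id rescans (a found-scan over all sublists plus an assign-scan testing every sublist against every new id) with a one-time index — the set of ids already present and the list of positions of sublists disjoint from the new ids — consumed by a single pointer pass over the new ids.
import Mathlib
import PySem

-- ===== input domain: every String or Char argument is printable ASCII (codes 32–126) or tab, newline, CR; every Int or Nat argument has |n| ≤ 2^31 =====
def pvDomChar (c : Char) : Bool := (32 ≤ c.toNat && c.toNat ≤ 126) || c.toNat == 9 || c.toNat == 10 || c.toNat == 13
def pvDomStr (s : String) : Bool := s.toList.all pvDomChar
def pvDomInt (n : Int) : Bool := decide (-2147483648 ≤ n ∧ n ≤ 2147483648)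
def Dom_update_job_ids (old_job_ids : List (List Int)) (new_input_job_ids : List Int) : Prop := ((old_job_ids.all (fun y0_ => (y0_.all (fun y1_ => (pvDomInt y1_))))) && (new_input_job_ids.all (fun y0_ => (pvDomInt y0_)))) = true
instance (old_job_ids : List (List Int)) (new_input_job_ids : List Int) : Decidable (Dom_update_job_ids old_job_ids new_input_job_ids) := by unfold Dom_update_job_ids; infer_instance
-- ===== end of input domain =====

-- B replaces A's per-id nested found/assign rescans by a one-time index (set of present
-- ids, list of positions of sublists disjoint from the new ids) and a single pointer pass.
-- Both Pythons mutate old_job_ids in place identically (appends + in-place sort);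
-- the theorems here are about the returned value.

-- ===== PORT A =====
-- A's inner assign loop: append nid to the first sublist containing no other new id
def pvFindAssign (newl : List Int) (nid : Int) : List (List Int) → List (List Int)
  | [] => []
  | s :: rest =>
    if newl.any (fun x => x != nid && s.contains x) then s :: pvFindAssign newl nid rest
    else (s ++ [nid]) :: rest

-- A's loop body for one new_job_id: the found-scan, then (if not found) the assign loop
def pvStepA (newl : List Int) (olds : List (List Int)) (nid : Int) : List (List Int) :=
  if olds.any (fun s => s.contains nid) then olds
  else pvFindAssign newl nid olds

def update_job_ids (old_job_ids : List (List Int)) (new_input_job_ids : List Int) : List (List Int) :=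
  PySem.List.sorted (new_input_job_ids.foldl (pvStepA new_input_job_ids) old_job_ids)
    (fun s => s.length) true

-- ===== PORT B =====
-- B's loop body: state = (sublists, present ids, pointer into clean positions)
def pvStepB (clean : List Int) (st : List (List Int) × PySem.Set Int × Nat) (nid : Int) :
    List (List Int) × PySem.Set Int × Nat :=
  if !(PySem.Set.contains st.2.1 nid) && decide (st.2.2 < clean.length) then
    let j := (clean.getD st.2.2 0).toNat
    (st.1.set j (st.1.getD j [] ++ [nid]), PySem.Set.add st.2.1 nid, st.2.2 + 1)
  else st

def update_job_ids_alt (old_job_ids : List (List Int)) (new_input_job_ids : List Int) : List (List Int) :=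
  let newset : PySem.Set Int := PySem.Set.ofList new_input_job_ids
  let present : PySem.Set Int := old_job_ids.foldl (fun s sub => PySem.Set.update s sub) PySem.Set.empty
  let clean : List Int :=
    ((PySem.List.enumerate old_job_ids).filter
      (fun p => !(p.2.any (fun x => PySem.Set.contains newset x)))).map (·.1)
  PySem.List.sorted (new_input_job_ids.foldl (pvStepB clean) (old_job_ids, present, 0)).1
    (fun s => s.length) true

-- ===== PRECONDITION & SPEC =====
def Spec_update_job_ids (old_job_ids : List (List Int)) (new_input_job_ids : List Int) (out : List (List Int)) : Prop := out = update_job_ids_alt old_job_ids new_input_job_ids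
instance (old_job_ids : List (List Int)) (new_input_job_ids : List Int) (out : List (List Int)) : Decidable (Spec_update_job_ids old_job_ids new_input_job_ids out) := by unfold Spec_update_job_ids; infer_instance

-- ===== CLAIM (what is proved, stated in full; the proofs are below) =====
def Claim_equal_update_job_ids : Prop := ∀ (old_job_ids : List (List Int)) (new_input_job_ids : List Int), Dom_update_job_ids old_job_ids new_input_job_ids → Spec_update_job_ids old_job_ids new_input_job_ids (update_job_ids old_job_ids new_input_job_ids)

-- ===== LEMMAS AND PROOFS =====

-- positions (front to back) of the sublists currently disjoint from the new ids
def cleanIdx (newl : List Int) : List (List Int) → List Int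
  | [] => []
  | s :: rest =>
    if s.any (fun x => newl.contains x) then (cleanIdx newl rest).map (· + 1)
    else 0 :: (cleanIdx newl rest).map (· + 1)

lemma cleanIdx_nonneg (newl : List Int) (olds : List (List Int)) :
    ∀ j ∈ cleanIdx newl olds, 0 ≤ j := by
  induction olds with
  | nil => simp [cleanIdx]
  | cons s rest ih =>
    intro j hj
    simp only [cleanIdx] at hj
    split at hj
    · obtain ⟨j', hj', rfl⟩ := List.mem_map.1 hj
      have := ih j' hj'; omega
    · rcases List.mem_cons.1 hj with rfl | h
      · omega
      · obtain ⟨j', hj', rfl⟩ := List.mem_map.1 h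
        have := ih j' hj'; omega

-- A's assign-loop test on a sublist not holding nid is exactly "dirty" (meets the new ids)
lemma cond_eq (newl : List Int) (nid : Int) (s : List Int) (h : s.contains nid = false) :
    newl.any (fun x => x != nid && s.contains x) = s.any (fun x => newl.contains x) := by
  rw [Bool.eq_iff_iff]
  simp only [List.any_eq_true, Bool.and_eq_true, bne_iff_ne, List.contains_eq_mem,
    decide_eq_true_eq]
  have hn : nid ∉ s := by simpa using h
  constructor
  · rintro ⟨x, hx, _, hxs⟩; exact ⟨x, hxs, hx⟩
  · rintro ⟨x, hxs, hxn⟩; exact ⟨x, hxn, fun he => hn (he ▸ hxs), hxs⟩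

-- A's assign loop = "append at the first clean position, if any"
lemma findAssign_eq (newl : List Int) (nid : Int) (olds : List (List Int))
    (hnf : ∀ s ∈ olds, s.contains nid = false) :
    pvFindAssign newl nid olds =
      (match cleanIdx newl olds with
       | [] => olds
       | j :: _ => olds.set j.toNat (olds.getD j.toNat [] ++ [nid])) := by
  induction olds with
  | nil => simp [pvFindAssign, cleanIdx]
  | cons s rest ih =>
    have hs := hnf s (by simp)
    rw [pvFindAssign, cleanIdx, cond_eq newl nid s hs]
    by_cases hd : s.any (fun x => newl.contains x) = true
    · simp only [hd, if_pos]
      rw [ih (fun t ht => hnf t (by simp [ht]))]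
      cases hc : cleanIdx newl rest with
      | nil => simp
      | cons j t =>
        have hj : 0 ≤ j := cleanIdx_nonneg newl rest j (by simp [hc])
        simp only [List.map_cons]
        have h1 : (j + 1).toNat = j.toNat + 1 := by omega
        simp [h1]
    · simp only [hd, if_neg, Bool.not_eq_true] at *
      cases hc : cleanIdx newl rest with
      | nil => simp
      | cons j t => simp

-- appending a new id at the first clean position consumes exactly that position
lemma cleanIdx_set (newl : List Int) (nid : Int) (hmem : nid ∈ newl) :
    ∀ (olds : List (List Int)) (j : Int) (t : List Int),
    cleanIdx newl olds = j :: t →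
    cleanIdx newl (olds.set j.toNat (olds.getD j.toNat [] ++ [nid])) = t := by
  intro olds
  induction olds with
  | nil => intro j t h; simp [cleanIdx] at h
  | cons s rest ih =>
    intro j t h
    rw [cleanIdx] at h
    by_cases hd : s.any (fun x => newl.contains x) = true
    · rw [if_pos hd] at h
      cases hc : cleanIdx newl rest with
      | nil => rw [hc] at h; simp at h
      | cons j' t' =>
        rw [hc] at h
        simp only [List.map_cons, List.cons.injEq] at h
        obtain ⟨rfl, rfl⟩ := h
        have hj' : 0 ≤ j' := cleanIdx_nonneg newl rest j' (by simp [hc])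
        have h1 : (j' + 1).toNat = j'.toNat + 1 := by omega
        rw [h1]
        simp only [List.set_cons_succ, List.getD_cons_succ]
        rw [cleanIdx, if_pos hd, ih j' t' hc]
    · rw [if_neg hd] at h
      simp only [List.cons.injEq] at h
      obtain ⟨rfl, rfl⟩ := h
      simp only [Int.toNat_zero, List.set_cons_zero, List.getD_cons_zero]
      rw [cleanIdx]
      have : (s ++ [nid]).any (fun x => newl.contains x) = true := by
        simp [hmem]
      rw [if_pos this]

-- membership across all sublists after the append: gains exactly nid
lemma any_set (nid x : Int) (newl : List Int) :
    ∀ (olds : List (List Int)) (j : Int) (t : List Int),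
    cleanIdx newl olds = j :: t →
    (olds.set j.toNat (olds.getD j.toNat [] ++ [nid])).any (fun s => s.contains x)
      = (olds.any (fun s => s.contains x) || x == nid) := by
  intro olds
  induction olds with
  | nil => intro j t h; simp [cleanIdx] at h
  | cons s rest ih =>
    intro j t h
    rw [cleanIdx] at h
    by_cases hd : s.any (fun y => newl.contains y) = true
    · rw [if_pos hd] at h
      cases hc : cleanIdx newl rest with
      | nil => rw [hc] at h; simp at h
      | cons j' t' =>
        rw [hc] at h
        simp only [List.map_cons, List.cons.injEq] at h
        obtain ⟨rfl, rfl⟩ := h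
        have hj' : 0 ≤ j' := cleanIdx_nonneg newl rest j' (by simp [hc])
        have h1 : (j' + 1).toNat = j'.toNat + 1 := by omega
        rw [h1]
        simp only [List.set_cons_succ, List.getD_cons_succ, List.any_cons]
        rw [ih j' t' hc]
        cases s.contains x <;> simp
    · rw [if_neg hd] at h
      simp only [List.cons.injEq] at h
      obtain ⟨rfl, rfl⟩ := h
      simp only [Int.toNat_zero, List.set_cons_zero, List.getD_cons_zero, List.any_cons]
      have : (s ++ [nid]).contains x = (s.contains x || x == nid) := by
        simp [List.contains_eq_mem, ← Bool.beq_eq_decide_eq]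
      rw [this]
      cases s.contains x <;> cases rest.any (fun s => s.contains x) <;> simp

lemma set_contains_add (s : PySem.Set Int) (y x : Int) :
    PySem.Set.contains (PySem.Set.add s y) x = (PySem.Set.contains s x || x == y) := by
  simp only [PySem.Set.contains_eq_listContains, PySem.Set.add]
  split
  · rename_i h
    cases hx : List.contains s x
    · simp only [Bool.false_or]
      cases hxy : x == y
      · simp
      · have : x = y := by simpa using hxy
        subst this
        simp_all
    · simp
  · simp [List.contains_eq_mem, ← Bool.beq_eq_decide_eq]

lemma contains_update (sub : List Int) :
    ∀ (s : PySem.Set Int) (x : Int),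
    PySem.Set.contains (PySem.Set.update s sub) x = (PySem.Set.contains s x || sub.contains x) := by
  induction sub with
  | nil => intro s x; simp [PySem.Set.update]
  | cons a t ih =>
    intro s x
    have : PySem.Set.update s (a :: t) = PySem.Set.update (PySem.Set.add s a) t := by
      simp [PySem.Set.update]
    rw [this, ih, set_contains_add]
    simp only [List.contains_cons]
    cases PySem.Set.contains s x <;> cases h : x == a <;> simp

-- B's initial present set holds exactly the ids of the original sublists
lemma present_init (olds : List (List Int)) (x : Int) :
    PySem.Set.contains (olds.foldl (fun s sub => PySem.Set.update s sub) PySem.Set.empty) x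
      = olds.any (fun s => s.contains x) := by
  have gen : ∀ (l : List (List Int)) (acc : PySem.Set Int),
      PySem.Set.contains (l.foldl (fun s sub => PySem.Set.update s sub) acc) x
        = (PySem.Set.contains acc x || l.any (fun s => s.contains x)) := by
    intro l
    induction l with
    | nil => intro acc; simp
    | cons a t ih =>
      intro acc
      simp only [List.foldl_cons, List.any_cons]
      rw [ih, contains_update]
      cases PySem.Set.contains acc x <;> cases a.contains x <;> simp
  rw [gen]
  simp [PySem.Set.empty, PySem.Set.contains_eq_listContains]

lemma contains_ofList (newl : List Int) (x : Int) :
    PySem.Set.contains (PySem.Set.ofList newl) x = newl.contains x := by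
  rw [Bool.eq_iff_iff, PySem.Set.contains_iff]
  simp [PySem.Set.mem_ofList]

lemma clean_init_gen (newl : List Int) :
    ∀ (olds : List (List Int)) (st : Int),
    ((PySem.List.enumerate olds st).filter
      (fun p => !(p.2.any (fun x => PySem.Set.contains (PySem.Set.ofList newl) x)))).map (·.1)
      = (cleanIdx newl olds).map (· + st) := by
  intro olds
  induction olds with
  | nil => intro st; simp [PySem.List.enumerate_nil, cleanIdx]
  | cons s rest ih =>
    intro st
    rw [PySem.List.enumerate_cons, cleanIdx]
    have hc : (s.any fun x => PySem.Set.contains (PySem.Set.ofList newl) x)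
        = (s.any fun x => newl.contains x) :=
      PySem.List.any_congr_mem (fun x _ => contains_ofList newl x)
    rw [List.filter_cons]
    have hcond : (!(st, s).2.any fun x => PySem.Set.contains (PySem.Set.ofList newl) x)
        = !(s.any fun x => newl.contains x) := by
      rw [show ((st, s).2 : List Int) = s from rfl, hc]
    rw [hcond]
    by_cases hd : s.any (fun x => newl.contains x) = true
    · rw [if_pos hd, if_neg (by rw [hd]; simp)]
      rw [ih, List.map_map]
      exact List.map_congr_left (fun j _ => by simp [Function.comp]; ring)
    · simp only [Bool.not_eq_true] at hd
      rw [hd]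
      simp only [Bool.not_false, if_true, Bool.false_eq_true, if_false, List.map_cons]
      rw [ih, List.map_map]
      congr 1
      · simp
      · exact List.map_congr_left (fun j _ => by simp [Function.comp]; ring)

-- B's initial clean list is exactly the clean positions of the original sublists
lemma clean_init (newl : List Int) (olds : List (List Int)) :
    ((PySem.List.enumerate olds).filter
      (fun p => !(p.2.any (fun x => PySem.Set.contains (PySem.Set.ofList newl) x)))).map (·.1)
      = cleanIdx newl olds := by
  have := clean_init_gen newl olds 0
  simpa using this

-- the main loop invariant: A's fold and B's fold keep identical sublists
lemma loop_eq (newl clean : List Int) :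
    ∀ (rest : List Int) (olds : List (List Int)) (present : PySem.Set Int) (i : Nat),
    (∀ y ∈ rest, y ∈ newl) →
    (∀ x, PySem.Set.contains present x = olds.any (fun s => s.contains x)) →
    clean.drop i = cleanIdx newl olds →
    rest.foldl (pvStepA newl) olds = (rest.foldl (pvStepB clean) (olds, present, i)).1 := by
  intro rest
  induction rest with
  | nil => intro olds present i _ _ _; rfl
  | cons nid rest ih =>
    intro olds present i hsub hpres hclean
    simp only [List.foldl_cons]
    by_cases hf : olds.any (fun s => s.contains nid) = true
    · have hA : pvStepA newl olds nid = olds := by rw [pvStepA, if_pos hf]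
      have hB : pvStepB clean (olds, present, i) nid = (olds, present, i) := by
        have : PySem.Set.contains present nid = true := by rw [hpres]; exact hf
        simp only [pvStepB]
        rw [this]
        simp
      rw [hA, hB]
      exact ih olds present i (fun y hy => hsub y (by simp [hy])) hpres hclean
    · simp only [Bool.not_eq_true] at hf
      have hnotin : PySem.Set.contains present nid = false := by rw [hpres]; exact hf
      have hnf : ∀ s ∈ olds, s.contains nid = false := by
        intro s hs
        have := List.any_eq_false.1 hf s hs
        simpa using this
      have hA : pvStepA newl olds nid = pvFindAssign newl nid olds := by
        rw [pvStepA, if_neg (by rw [hf]; simp)]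
      rw [hA, findAssign_eq newl nid olds hnf]
      by_cases hi : i < clean.length
      · -- a clean sublist is still available: both append nid there
        have hdrop : clean.drop i = clean[i] :: clean.drop (i + 1) :=
          List.drop_eq_getElem_cons hi
        have hcx : cleanIdx newl olds = clean[i] :: clean.drop (i + 1) := by
          rw [← hclean, hdrop]
        have hgetD : clean.getD i 0 = clean[i] := by
          simp [List.getD, List.getElem?_eq_getElem hi]
        have hB : pvStepB clean (olds, present, i) nid =
            (olds.set (clean[i]).toNat (olds.getD (clean[i]).toNat [] ++ [nid]),
             PySem.Set.add present nid, i + 1) := by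
          simp only [pvStepB]
          rw [hnotin]
          simp only [Bool.not_false, hi, decide_true, Bool.and_self, if_true]
          rw [hgetD]
        rw [hB, hcx]
        refine ih _ _ _ (fun y hy => hsub y (by simp [hy])) ?_ ?_
        · intro x
          rw [set_contains_add, hpres, any_set nid x newl olds clean[i] (clean.drop (i+1)) hcx]
        · rw [cleanIdx_set newl nid (hsub nid (by simp)) olds clean[i] (clean.drop (i+1)) hcx]
      · -- clean sublists exhausted: both drop nid
        have hdrop : clean.drop i = [] := List.drop_eq_nil_of_le (by omega)
        have hcx : cleanIdx newl olds = [] := by rw [← hclean, hdrop]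
        have hB : pvStepB clean (olds, present, i) nid = (olds, present, i) := by
          simp only [pvStepB]
          simp [hi]
        rw [hB, hcx]
        exact ih olds present i (fun y hy => hsub y (by simp [hy])) hpres hclean

-- ===== VERDICT (by name: the statement is the Claim_ definition above) =====
theorem update_job_ids_spec : Claim_equal_update_job_ids := by
  intro olds newl _
  unfold Spec_update_job_ids update_job_ids update_job_ids_alt
  congr 1
  exact loop_eq newl _ newl olds _ 0 (fun _ h => h)
    (present_init olds) (by simpa using clean_init newl olds)
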